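-- pv_equiv track=rewrite | github.com/BonucciAndrea/DurreHeesch | Dreducing_graphs_final.py | ArrowToBlock
-- ===== SOURCE A (Python) =====
-- def ArrowToBlock(l):
--     n = 0
--     l1 = [0]
--     for x in range(len(l) - 1):             # We go through the list of arrows:
--         if l[x] == 1:                       # If up arrow
--             while n in l1:                  #       look at which numbers we've used
--                 n = n +1
--             l1.append(n)                    #       add the next available number to our list of block indeces
--             n = 0
--         else:
--             while l1[n] != l1[-1]:          # Take current block index and find first instance of this in our list
--                 n = n + 1
--             l1.append(l1[n-1])              # Add the previous entry
--             n = 0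
--     return l1
-- ===== SOURCE B (Python) =====
-- def ArrowToBlock(l):
--     # A's output is a walk on a tree of blocks: an up-arrow creates a child
--     # block (fresh blocks are numbered 1,2,3,... in creation order, since the
--     # used values always form {0..c}), a down-arrow moves to the parent of the
--     # current block (the entry before a block's first occurrence is the block
--     # that was current when it was created).  So keep a parent array and the
--     # current block; no mex search and no first-occurrence search at all.
--     parent = [0]          # parent[b] for each block b; the root is its own parent
--     cur = 0
--     out = [0]
--     for a in l[:-1]:
--         if a == 1:
--             parent.append(cur)
--             cur = len(parent) - 1
--         else:
--             cur = parent[cur]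
--         out.append(cur)
--     return out
-- ===== Notes on version B (the rewrite author's own statement) =====
-- stated objective: alternative
-- what changed: B reinterprets the sequence as a walk on a tree of blocks: it keeps a parent array and the current block, so an up-arrow just appends a child numbered by a running counter and a down-arrow is one parent lookup - both of A's restart-from-zero inner scans (mex search over l1 and first-occurrence search for l1[-1]) disappear.
import Mathlib
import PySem

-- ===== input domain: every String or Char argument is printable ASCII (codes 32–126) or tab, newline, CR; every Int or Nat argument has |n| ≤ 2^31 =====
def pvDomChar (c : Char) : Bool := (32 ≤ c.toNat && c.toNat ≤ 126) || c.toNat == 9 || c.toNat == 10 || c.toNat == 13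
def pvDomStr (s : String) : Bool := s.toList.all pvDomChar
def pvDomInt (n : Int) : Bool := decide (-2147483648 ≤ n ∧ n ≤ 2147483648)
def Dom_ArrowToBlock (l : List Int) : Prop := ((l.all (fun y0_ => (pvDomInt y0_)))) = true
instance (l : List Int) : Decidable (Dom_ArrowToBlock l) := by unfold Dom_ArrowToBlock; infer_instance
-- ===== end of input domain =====

-- B reinterprets the arrow sequence as a walk on a tree of blocks (parent array +
-- current block, one counter), replacing A's two restart-from-zero inner scans.

-- ===== PORT A =====

-- termination measure fact for the 'while n in l1: n += 1' loop (cited by the port)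
theorem pvFilterLenLt (l1 : List Int) (n : Int) (h : n ∈ l1) :
    (l1.filter (fun v => n + 1 ≤ v)).length < (l1.filter (fun v => n ≤ v)).length := by
  have hrw : (fun v : Int => decide (n + 1 ≤ v)) = (fun v : Int => decide (n < v)) := by
    funext v
    simp only [decide_eq_decide]
    omega
  rw [hrw]
  induction l1 with
  | nil => cases h
  | cons x xs ih =>
    have hsub : (xs.filter (fun v => decide (n < v))).length ≤
        (xs.filter (fun v => decide (n ≤ v))).length := by
      apply List.Sublist.length_le
      apply List.monotone_filter_right
      intro v hv
      simp only [decide_eq_true_eq] at hv ⊢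
      omega
    rcases List.mem_cons.mp h with hx | hx
    · subst hx
      simp only [List.filter_cons]
      simp
      omega
    · have hih := ih hx
      simp only [List.filter_cons]
      by_cases h1 : n < x
      · have h2 : n ≤ x := by omega
        simp [h1, h2]; omega
      · by_cases h2 : n ≤ x
        · simp [h1, h2]; omega
        · simp [h1, h2]; omega

-- 'while n in l1: n = n + 1' (A's up-arrow inner loop)
def ArrowToBlock_mexLoop (l1 : List Int) (n : Int) : Int :=
  if h : n ∈ l1 then ArrowToBlock_mexLoop l1 (n + 1) else n
termination_by (l1.filter (fun v => n ≤ v)).length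
decreasing_by exact pvFilterLenLt l1 n h

-- 'while l1[n] != last: n = n + 1' (A's down-arrow inner loop; last = l1[-1]).
-- pyGet? = none is Python's IndexError (unreachable here since last ∈ l1): we stop.
def ArrowToBlock_findLoop (l1 : List Int) (last : Int) (n : Int) : Int :=
  match hv : PySem.List.pyGet? l1 n with
  | none => n
  | some v => if v = last then n else ArrowToBlock_findLoop l1 last (n + 1)
termination_by ((l1.length : Int) - n).toNat
decreasing_by
  have h2 : ¬ (PySem.List.pyGet? l1 n = none) := by simp [hv]
  rw [PySem.List.pyGet?_eq_none_iff] at h2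
  simp [PySem.Raise.InRange] at h2
  omega

-- one iteration of A's for-loop body, state (n, l1); n is reset to 0 in both branches
def ArrowToBlock_step (s : Int × List Int) (a : Int) : Int × List Int :=
  if a = 1 then
    let m := ArrowToBlock_mexLoop s.2 s.1
    (0, s.2 ++ [m])
  else
    let last := (PySem.List.pyGet? s.2 (-1)).getD 0
    let k := ArrowToBlock_findLoop s.2 last s.1
    (0, s.2 ++ [(PySem.List.pyGet? s.2 (k - 1)).getD 0])

-- 'for x in range(len(l) - 1)' reads l[0..len-2], i.e. folds over l.dropLast
def ArrowToBlock (l : List Int) : List Int :=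
  (l.dropLast.foldl ArrowToBlock_step (0, [0])).2

-- ===== PORT B =====

-- one iteration of B's loop body, state (out, parent, cur)
def ArrowToBlock_altStep (s : List Int × List Int × Int) (a : Int) :
    List Int × List Int × Int :=
  if a = 1 then
    let parent := s.2.1 ++ [s.2.2]
    let cur := (parent.length : Int) - 1
    (s.1 ++ [cur], parent, cur)
  else
    let cur := (PySem.List.pyGet? s.2.1 s.2.2).getD 0   -- parent[cur]; always in range
    (s.1 ++ [cur], s.2.1, cur)

-- 'for a in l[:-1]: …'
def ArrowToBlock_alt (l : List Int) : List Int :=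
  ((PySem.List.slice l none (some (-1))).foldl ArrowToBlock_altStep ([0], [0], 0)).1

-- ===== PRECONDITION & SPEC =====
def Spec_ArrowToBlock (l : List Int) (out : List Int) : Prop := out = ArrowToBlock_alt l
instance (l : List Int) (out : List Int) : Decidable (Spec_ArrowToBlock l out) := by unfold Spec_ArrowToBlock; infer_instance

-- ===== CLAIM (what is proved, stated in full; the proofs are below) =====
def Claim_equal_ArrowToBlock : Prop := ∀ (l : List Int), Dom_ArrowToBlock l → Spec_ArrowToBlock l (ArrowToBlock l)

-- ===== LEMMAS AND PROOFS =====

-- j is the index of the first occurrence of v in l1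
def pvFirstAt (l1 : List Int) (v : Int) (j : Nat) : Prop :=
  l1[j]? = some v ∧ ∀ i < j, ¬ l1[i]? = some v

-- the simulation invariant between A's list l1 and B's state (l1, parent, cur)
def pvInv (l1 parent : List Int) (cur : Int) : Prop :=
  l1[0]? = some 0 ∧ parent[0]? = some 0 ∧
  l1.getLast? = some cur ∧
  0 ≤ cur ∧ cur < parent.length ∧
  (∀ v : Int, v ∈ l1 ↔ 0 ≤ v ∧ v < parent.length) ∧
  (∀ p ∈ parent, 0 ≤ p ∧ p < parent.length) ∧
  (∀ b : Nat, b < parent.length → ∃ j : Nat, pvFirstAt l1 (b : Int) j ∧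
      ((j = 0 ∧ b = 0) ∨ (0 < j ∧ l1[j-1]? = parent[b]?)))

theorem pvMexLoop_spec (l1 : List Int) (a : Int) :
    a ≤ ArrowToBlock_mexLoop l1 a ∧ ArrowToBlock_mexLoop l1 a ∉ l1 ∧
    ∀ k, a ≤ k → k < ArrowToBlock_mexLoop l1 a → k ∈ l1 := by
  fun_induction ArrowToBlock_mexLoop l1 a with
  | case1 n h ih =>
    obtain ⟨ih1, ih2, ih3⟩ := ih
    refine ⟨by omega, ih2, ?_⟩
    intro k hk1 hk2
    by_cases hk : k = n
    · subst hk; exact h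
    · exact ih3 k (by omega) hk2
  | case2 n h =>
    exact ⟨le_rfl, h, by intro k hk1 hk2; omega⟩

theorem pvFindLoop_finds (l1 : List Int) (last : Int) (j : Nat)
    (hj : pvFirstAt l1 last j) : ∀ (d n : Nat), n + d = j →
    ArrowToBlock_findLoop l1 last (n : Int) = (j : Int) := by
  intro d
  induction d with
  | zero =>
    intro n hn
    have hn' : n = j := by omega
    subst hn'
    rw [ArrowToBlock_findLoop]
    rw [show PySem.List.pyGet? l1 (n : Int) = some last from by
      rw [PySem.List.pyGet?_natCast, hj.1]]
    simp
  | succ d ih =>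
    intro n hn
    have hnj : n < j := by omega
    have hjlen : j < l1.length := (List.getElem?_eq_some_iff.mp hj.1).1
    have hnlen : n < l1.length := by omega
    have hne : l1[n] ≠ last := by
      intro he
      exact hj.2 n hnj (by rw [List.getElem?_eq_getElem hnlen, he])
    rw [ArrowToBlock_findLoop]
    rw [show PySem.List.pyGet? l1 (n : Int) = some l1[n] from by
      rw [PySem.List.pyGet?_natCast, List.getElem?_eq_getElem hnlen]]
    simp only [hne, if_false]
    rw [show (n : Int) + 1 = ((n + 1 : Nat) : Int) from by push_cast; ring]
    exact ih (n + 1) (by omega)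

theorem pvFirstAt_append (l1 : List Int) (v : Int) (j : Nat) (w : Int)
    (hfa : pvFirstAt l1 v j) : pvFirstAt (l1 ++ [w]) v j := by
  have hjlen : j < l1.length := (List.getElem?_eq_some_iff.mp hfa.1).1
  refine ⟨?_, ?_⟩
  · rw [List.getElem?_append_left hjlen]; exact hfa.1
  · intro i hi
    rw [List.getElem?_append_left (by omega)]
    exact hfa.2 i hi

theorem pvStep_sim (l1 parent : List Int) (cur : Int) (a : Int)
    (h : pvInv l1 parent cur) :
    ArrowToBlock_step (0, l1) a = (0, (ArrowToBlock_altStep (l1, parent, cur) a).1) ∧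
    pvInv (ArrowToBlock_altStep (l1, parent, cur) a).1
      (ArrowToBlock_altStep (l1, parent, cur) a).2.1
      (ArrowToBlock_altStep (l1, parent, cur) a).2.2 := by
  obtain ⟨hhead, hp0, hlastE, hc0, hclen, hmemiff, hpent, hfst⟩ := h
  have hlen : 0 < l1.length := (List.getElem?_eq_some_iff.mp hhead).1
  have hne : l1 ≠ [] := by intro e; subst e; simp at hlen
  have hplen : 0 < parent.length := (List.getElem?_eq_some_iff.mp hp0).1
  by_cases ha : a = 1
  · -- up arrow: A appends the mex, which equals parent.length
    subst ha
    have hmex : ArrowToBlock_mexLoop l1 0 = (parent.length : Int) := by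
      obtain ⟨h0, hnotin, hseg⟩ := pvMexLoop_spec l1 0
      have h1 : ¬ ((0:Int) ≤ ArrowToBlock_mexLoop l1 0 ∧
          ArrowToBlock_mexLoop l1 0 < parent.length) := by
        intro hc; exact hnotin ((hmemiff _).mpr hc)
      have h2 : ¬ ((parent.length : Int) < ArrowToBlock_mexLoop l1 0) := by
        intro hc
        have := (hmemiff _).mp (hseg (parent.length : Int) (by omega) hc)
        omega
      omega
    have hA : ArrowToBlock_step (0, l1) 1 = (0, l1 ++ [(parent.length : Int)]) := by
      simp [ArrowToBlock_step, hmex]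
    have hB : ArrowToBlock_altStep (l1, parent, cur) 1 =
        (l1 ++ [(parent.length : Int)], parent ++ [cur], (parent.length : Int)) := by
      simp [ArrowToBlock_altStep]
    rw [hA, hB]
    dsimp only
    refine ⟨rfl, ?_, ?_, ?_, by omega,
      by simp only [List.length_append, List.length_singleton]; push_cast; omega,
      ?_, ?_, ?_⟩
    · rw [List.getElem?_append_left hlen]; exact hhead
    · rw [List.getElem?_append_left hplen]; exact hp0
    · exact List.getLast?_concat
    · intro v
      rw [List.mem_append]
      simp only [List.mem_singleton, List.length_append, List.length_singleton]
      rw [hmemiff v]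
      push_cast
      omega
    · intro p hp
      simp only [List.length_append, List.length_singleton]
      rcases List.mem_append.mp hp with h1 | h1
      · have := hpent p h1; push_cast; omega
      · simp at h1; subst h1; push_cast; omega
    · intro b hb
      simp only [List.length_append, List.length_singleton] at hb
      by_cases hbl : b < parent.length
      · obtain ⟨j, hfa, hdis⟩ := hfst b hbl
        refine ⟨j, pvFirstAt_append l1 _ j _ hfa, ?_⟩
        rcases hdis with h1 | ⟨h1, h2⟩
        · exact Or.inl h1
        · refine Or.inr ⟨h1, ?_⟩
          have hjlen : j < l1.length := (List.getElem?_eq_some_iff.mp hfa.1).1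
          rw [List.getElem?_append_left (by omega), h2,
            List.getElem?_append_left hbl]
      · have hbeq : b = parent.length := by omega
        subst hbeq
        refine ⟨l1.length, ⟨?_, ?_⟩, ?_⟩
        · rw [List.getElem?_append_right (le_refl _)]
          simp
        · intro i hi
          rw [List.getElem?_append_left hi]
          intro he
          have := (hmemiff _).mp (List.mem_of_getElem? he)
          omega
        · refine Or.inr ⟨hlen, ?_⟩
          rw [List.getElem?_append_left (by omega),
            List.getElem?_append_right (le_refl _)]
          simp only [Nat.sub_self, List.getElem?_cons_zero]
          rw [← List.getLast?_eq_getElem?]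
          exact hlastE
  · -- down arrow: A rescans for the parent; B reads it from the parent array
    have hlast : (PySem.List.pyGet? l1 (-1)).getD 0 = cur := by
      rw [PySem.List.pyGet?_neg_one, hlastE]; rfl
    have hb : cur.toNat < parent.length := by omega
    have hcast : ((cur.toNat : Nat) : Int) = cur := Int.toNat_of_nonneg hc0
    obtain ⟨j, hfa, hdis⟩ := hfst cur.toNat hb
    rw [hcast] at hfa
    have hjlen : j < l1.length := (List.getElem?_eq_some_iff.mp hfa.1).1
    have hfind : ArrowToBlock_findLoop l1 cur 0 = (j : Int) := by
      have hff := pvFindLoop_finds l1 cur j hfa j 0 (by omega)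
      simpa using hff
    obtain ⟨w, hw⟩ : ∃ w, parent[cur.toNat]? = some w :=
      ⟨parent[cur.toNat], List.getElem?_eq_getElem hb⟩
    have hwmem : w ∈ parent := List.mem_of_getElem? hw
    have hwrange := hpent w hwmem
    have hAval : (PySem.List.pyGet? l1 ((j : Int) - 1)).getD 0 = w := by
      rcases hdis with ⟨hj0, hb0⟩ | ⟨hj0, hprev⟩
      · -- first occurrence at index 0: cur = 0, A reads l1[-1] = cur = 0 = parent[0]
        have hcur0 : cur = 0 := by
          have : cur.toNat = 0 := hb0
          omega
        subst hj0
        simp only [Nat.cast_zero, zero_sub]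
        rw [hlast, hcur0]
        rw [hcur0] at hw
        simp only [Int.toNat_zero] at hw
        rw [hp0] at hw
        exact (Option.some_injective _ hw)
      · rw [show (j : Int) - 1 = ((j - 1 : Nat) : Int) from by
          push_cast [Nat.cast_sub (by omega : 1 ≤ j)]; ring]
        rw [PySem.List.pyGet?_natCast, hprev, hw]
        rfl
    have hBval : (PySem.List.pyGet? parent cur).getD 0 = w := by
      rw [← hcast, PySem.List.pyGet?_natCast, hw]
      rfl
    have hA : ArrowToBlock_step (0, l1) a = (0, l1 ++ [w]) := by
      simp only [ArrowToBlock_step, if_neg ha, hlast, hfind, hAval]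
    have hB : ArrowToBlock_altStep (l1, parent, cur) a = (l1 ++ [w], parent, w) := by
      simp only [ArrowToBlock_altStep, if_neg ha, hBval]
    rw [hA, hB]
    dsimp only
    have hwin : w ∈ l1 := (hmemiff w).mpr hwrange
    refine ⟨rfl, ?_, hp0, List.getLast?_concat, hwrange.1, hwrange.2, ?_, hpent, ?_⟩
    · rw [List.getElem?_append_left hlen]; exact hhead
    · intro v
      rw [List.mem_append]
      simp only [List.mem_singleton]
      rw [hmemiff v]
      constructor
      · rintro (h1 | h1)
        · exact h1
        · subst h1; exact hwrange
      · intro h1; exact Or.inl h1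
    · intro b hbl
      obtain ⟨j', hfa', hdis'⟩ := hfst b hbl
      refine ⟨j', pvFirstAt_append l1 _ j' _ hfa', ?_⟩
      rcases hdis' with h1 | ⟨h1, h2⟩
      · exact Or.inl h1
      · refine Or.inr ⟨h1, ?_⟩
        have hjl' : j' < l1.length := (List.getElem?_eq_some_iff.mp hfa'.1).1
        rw [List.getElem?_append_left (by omega)]
        exact h2

theorem pvFold_sim : ∀ (xs l1 parent : List Int) (cur : Int),
    pvInv l1 parent cur →
    (xs.foldl ArrowToBlock_step (0, l1)).2 =
      (xs.foldl ArrowToBlock_altStep (l1, parent, cur)).1 := by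
  intro xs
  induction xs with
  | nil => intro l1 parent cur _; rfl
  | cons a xs ih =>
    intro l1 parent cur h
    obtain ⟨heq, hinv⟩ := pvStep_sim l1 parent cur a h
    simp only [List.foldl_cons]
    rw [show ArrowToBlock_altStep (l1, parent, cur) a =
        ((ArrowToBlock_altStep (l1, parent, cur) a).1,
         (ArrowToBlock_altStep (l1, parent, cur) a).2.1,
         (ArrowToBlock_altStep (l1, parent, cur) a).2.2) from rfl] at hinv ⊢
    rw [heq]
    exact ih _ _ _ hinv

theorem pvInit : pvInv [0] [0] 0 := by
  refine ⟨rfl, rfl, rfl, le_rfl, by norm_num, ?_, ?_, ?_⟩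
  · intro v
    simp only [List.mem_singleton, List.length_singleton]
    omega
  · intro p hp
    simp at hp; subst hp; simp
  · intro b hb
    simp only [List.length_singleton] at hb
    have : b = 0 := by omega
    subst this
    exact ⟨0, ⟨rfl, by intro i hi; omega⟩, Or.inl ⟨rfl, rfl⟩⟩

-- ===== VERDICT (by name: the statement is the Claim_ definition above) =====
theorem ArrowToBlock_spec : Claim_equal_ArrowToBlock := by
  intro l _
  unfold Spec_ArrowToBlock ArrowToBlock ArrowToBlock_alt
  rw [PySem.List.slice_to_neg_one]
  exact pvFold_sim l.dropLast [0] [0] 0 pvInit
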